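-- pv_equiv track=rewrite | github.com/fedor-konovalenko/a_hockey | gradio_demo_app/clear_game.py | get_index_for_game
-- ===== SOURCE A (Python) =====
-- def get_index_for_game(info_list):
--     last_value=info_list[0][-1]
--     x = info_list[0][1]
--     coord = []
--     for i in range(len(info_list)):
--         if info_list[i][-1]!=last_value or i==len(info_list)-1:
--             y=info_list[i][1]
--             coord.append([last_value, x,y])
--             x,last_value = y,info_list[i][-1]
--     game_coord = list(filter(lambda x: x[0]==1, coord))
--     return game_coord
-- ===== SOURCE B (Python) =====
-- def get_index_for_game(info_list):
--     n = len(info_list)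
--     cuts = [i for i in range(1, n) if info_list[i][-1] != info_list[i - 1][-1]]
--     if not cuts or cuts[-1] != n - 1:
--         cuts.append(n - 1)
--     segments = []
--     p = 0
--     for c in cuts:
--         segments.append([info_list[c - 1][-1], info_list[p][1], info_list[c][1]])
--         p = c
--     return [s for s in segments if s[0] == 1]
-- ===== Notes on version B (the rewrite author's own statement) =====
-- stated objective: alternative
-- what changed: A's single stateful scan (carrying last_value/x and appending on the fly) is replaced by two separate passes: first compute the list of transition indices plus a final cut, then walk that cut list with a previous-cut pointer to build the segments.
import Mathlib
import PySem

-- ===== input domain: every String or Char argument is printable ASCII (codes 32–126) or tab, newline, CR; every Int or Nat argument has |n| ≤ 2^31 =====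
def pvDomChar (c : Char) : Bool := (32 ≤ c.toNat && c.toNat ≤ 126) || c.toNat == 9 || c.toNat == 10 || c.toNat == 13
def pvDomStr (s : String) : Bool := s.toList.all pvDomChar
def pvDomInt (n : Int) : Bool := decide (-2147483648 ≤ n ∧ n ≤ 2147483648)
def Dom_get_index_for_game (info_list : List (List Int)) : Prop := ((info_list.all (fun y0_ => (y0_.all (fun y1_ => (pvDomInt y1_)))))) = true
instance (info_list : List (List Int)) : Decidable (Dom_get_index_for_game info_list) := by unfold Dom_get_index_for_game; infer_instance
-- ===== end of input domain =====

-- B separates boundary-finding (a transition-index list plus a final cut) from segment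
-- building (one walk over the cuts), instead of A's single stateful scan; objective: alternative decomposition, same cost.

-- ===== PORT A =====
-- shared accessors: Python's l[i], r[-1], r[1]; the `.getD` defaults are reached only
-- outside Pre_get_index_for_game, exactly where Python raises IndexError.
def pvRowGIG (l : List (List Int)) (i : Int) : List Int := (PySem.List.pyGet? l i).getD []
def pvLastGIG (r : List Int) : Int := (PySem.List.pyGet? r (-1)).getD 0
def pvSecGIG (r : List Int) : Int := (PySem.List.pyGet? r 1).getD 0

-- A's loop body: state (last_value, x, coord)
def pvStepA (l : List (List Int)) (n : Int) (st : Int × Int × List (List Int)) (i : Int) : Int × Int × List (List Int) :=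
  if pvLastGIG (pvRowGIG l i) ≠ st.1 ∨ i = n - 1 then
    (pvLastGIG (pvRowGIG l i), pvSecGIG (pvRowGIG l i), st.2.2 ++ [[st.1, st.2.1, pvSecGIG (pvRowGIG l i)]])
  else st

def get_index_for_game (info_list : List (List Int)) : List (List Int) :=
  let n : Int := info_list.length
  let st := (PySem.List.pyRange 0 n 1).foldl (pvStepA info_list n)
      (pvLastGIG (pvRowGIG info_list 0), pvSecGIG (pvRowGIG info_list 0), [])
  st.2.2.filter (fun x => (PySem.List.pyGet? x 0).getD 0 == 1)

-- ===== PORT B =====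
-- B's segment-emitting step: state (p, segments)
def pvStepB (l : List (List Int)) (st : Int × List (List Int)) (c : Int) : Int × List (List Int) :=
  (c, st.2 ++ [[pvLastGIG (pvRowGIG l (c - 1)), pvSecGIG (pvRowGIG l st.1), pvSecGIG (pvRowGIG l c)]])

def get_index_for_game_alt (info_list : List (List Int)) : List (List Int) :=
  let n : Int := info_list.length
  let t := (PySem.List.pyRange 1 n 1).filter
      (fun i => pvLastGIG (pvRowGIG info_list i) != pvLastGIG (pvRowGIG info_list (i - 1)))
  let cuts := if t = [] ∨ t.getLast? ≠ some (n - 1) then t ++ [n - 1] else t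
  let segs := (cuts.foldl (pvStepB info_list) (0, [])).2
  segs.filter (fun s => (PySem.List.pyGet? s 0).getD 0 == 1)

-- ===== PRECONDITION & SPEC =====
-- Pre_ = exactly the inputs where Python A returns (no IndexError): the list is nonempty,
-- every row is nonempty (r[-1]), and rows indexed with [1] — row 0, the last row, and
-- every transition row — have at least 2 elements.  B raises on the same inputs.
def Pre_get_index_for_game (info_list : List (List Int)) : Prop :=
  info_list ≠ [] ∧ (∀ r ∈ info_list, r ≠ []) ∧
  2 ≤ info_list.headI.length ∧ 2 ≤ (info_list.getLast?.getD []).length ∧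
  ∀ i ∈ List.range info_list.length, 1 ≤ i →
    (info_list.getD i []).getLast? ≠ (info_list.getD (i - 1) []).getLast? →
    2 ≤ (info_list.getD i []).length
instance (info_list : List (List Int)) : Decidable (Pre_get_index_for_game info_list) := by
  unfold Pre_get_index_for_game; infer_instance

def pvWitness_get_index_for_game : List (List Int) := [[1, 5], [0, 6], [1, 7]]

def Spec_get_index_for_game (info_list : List (List Int)) (out : List (List Int)) : Prop := out = get_index_for_game_alt info_list
instance (info_list : List (List Int)) (out : List (List Int)) : Decidable (Spec_get_index_for_game info_list out) := by unfold Spec_get_index_for_game; infer_instance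

-- ===== CLAIM (what is proved, stated in full; the proofs are below) =====
def Claim_equal_get_index_for_game : Prop := ∀ (info_list : List (List Int)), Dom_get_index_for_game info_list → Pre_get_index_for_game info_list → Spec_get_index_for_game info_list (get_index_for_game info_list)

-- ===== LEMMAS AND PROOFS =====

-- proof-only: B's cut list computed from index a on
def pvCutsFrom (l : List (List Int)) (n a : Int) : List Int :=
  let t := (PySem.List.pyRange a n 1).filter
      (fun i => pvLastGIG (pvRowGIG l i) != pvLastGIG (pvRowGIG l (i - 1)))
  if t = [] ∨ t.getLast? ≠ some (n - 1) then t ++ [n - 1] else t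

-- proof-only: the segments B emits for a cut list, with the 'previous second coordinate' x
def pvBSegs (l : List (List Int)) : List Int → Int → List (List Int)
  | [], _ => []
  | c :: cs, x =>
      [pvLastGIG (pvRowGIG l (c - 1)), x, pvSecGIG (pvRowGIG l c)] :: pvBSegs l cs (pvSecGIG (pvRowGIG l c))

theorem pvFoldB_eq_bSegs (l : List (List Int)) :
    ∀ (cuts : List Int) (p : Int) (segs : List (List Int)),
      (cuts.foldl (pvStepB l) (p, segs)).2 = segs ++ pvBSegs l cuts (pvSecGIG (pvRowGIG l p)) := by
  intro cuts
  induction cuts with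
  | nil => intro p segs; simp [pvBSegs]
  | cons c cs ih => intro p segs; simp [pvStepB, pvBSegs, ih]

theorem pvCutsFrom_last (l : List (List Int)) (n : Int) :
    pvCutsFrom l n (n - 1) = [n - 1] := by
  simp only [pvCutsFrom]
  rw [PySem.List.pyRange_one_cons (by omega : n - 1 < n)]
  rw [show PySem.List.pyRange (n - 1 + 1) n = [] by simp [PySem.List.pyRange]]
  by_cases hp : (pvLastGIG (pvRowGIG l (n-1)) != pvLastGIG (pvRowGIG l (n-1-1))) = true
  · simp [hp]
  · simp only [Bool.not_eq_true] at hp; simp [hp]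

theorem pvCutsFrom_cons (l : List (List Int)) (n a : Int) (h1 : a < n - 1)
    (hp : (pvLastGIG (pvRowGIG l a) != pvLastGIG (pvRowGIG l (a - 1))) = true) :
    pvCutsFrom l n a = a :: pvCutsFrom l n (a + 1) := by
  simp only [pvCutsFrom]
  rw [PySem.List.pyRange_one_cons (by omega : a < n)]
  simp only [List.filter_cons, hp, reduceIte]
  generalize (PySem.List.pyRange (a+1) n).filter
      (fun i => pvLastGIG (pvRowGIG l i) != pvLastGIG (pvRowGIG l (i - 1))) = t
  cases t with
  | nil =>
      have : a ≠ n - 1 := by omega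
      simp [this]
  | cons b bs =>
      have hg : (a :: b :: bs).getLast? = (b :: bs).getLast? := List.getLast?_cons_cons
      by_cases hc : (b :: bs).getLast? = some (n - 1)
      · rw [if_neg (by simp [hg, hc]), if_neg (by simp [hc])]
      · rw [if_pos (by simp [hg, hc]), if_pos (by simp [hc])]
        rfl

theorem pvCutsFrom_skip (l : List (List Int)) (n a : Int) (h1 : a < n)
    (hp : (pvLastGIG (pvRowGIG l a) != pvLastGIG (pvRowGIG l (a - 1))) = false) :
    pvCutsFrom l n a = pvCutsFrom l n (a + 1) := by
  simp only [pvCutsFrom]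
  rw [PySem.List.pyRange_one_cons (by omega : a < n)]
  simp only [List.filter_cons, hp, Bool.false_eq_true, if_false]

theorem pvMain (l : List (List Int)) (n : Int) :
    ∀ (k : Nat) (a : Int), a = n - k → 1 ≤ a → a ≤ n - 1 →
    ∀ (x : Int) (coord : List (List Int)),
      ((PySem.List.pyRange a n 1).foldl (pvStepA l n) (pvLastGIG (pvRowGIG l (a - 1)), x, coord)).2.2
        = coord ++ pvBSegs l (pvCutsFrom l n a) x := by
  intro k
  induction k with
  | zero => intro a ha h1 h2; exfalso; push_cast at ha; omega
  | succ k ih =>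
    intro a ha h1 h2 x coord
    by_cases hlast : a = n - 1
    · subst hlast
      rw [PySem.List.pyRange_one_cons (by omega : n - 1 < n),
          show PySem.List.pyRange (n - 1 + 1) n = [] from by simp [PySem.List.pyRange]]
      simp only [List.foldl_cons, List.foldl_nil, pvStepA]
      rw [if_pos (Or.inr trivial), pvCutsFrom_last]
      simp [pvBSegs]
    · have hlt : a < n - 1 := by omega
      rw [PySem.List.pyRange_one_cons (by omega : a < n)]
      simp only [List.foldl_cons]
      by_cases hp : pvLastGIG (pvRowGIG l a) = pvLastGIG (pvRowGIG l (a - 1))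
      · rw [show pvStepA l n (pvLastGIG (pvRowGIG l (a - 1)), x, coord) a
              = (pvLastGIG (pvRowGIG l (a - 1)), x, coord) from by
            simp [pvStepA, hp, hlast]]
        rw [pvCutsFrom_skip l n a (by omega) (by simp [hp])]
        have e : pvLastGIG (pvRowGIG l (a - 1)) = pvLastGIG (pvRowGIG l (a + 1 - 1)) := by
          rw [show a + 1 - 1 = a from by ring]; exact hp.symm
        rw [e, ih (a + 1) (by push_cast at ha ⊢; omega) (by omega) (by omega)]
      · rw [show pvStepA l n (pvLastGIG (pvRowGIG l (a - 1)), x, coord) a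
              = (pvLastGIG (pvRowGIG l a), pvSecGIG (pvRowGIG l a),
                 coord ++ [[pvLastGIG (pvRowGIG l (a - 1)), x, pvSecGIG (pvRowGIG l a)]]) from by
            simp [pvStepA, hp]]
        have e : pvLastGIG (pvRowGIG l a) = pvLastGIG (pvRowGIG l (a + 1 - 1)) := by
          rw [show a + 1 - 1 = a from by ring]
        rw [e, ih (a + 1) (by push_cast at ha ⊢; omega) (by omega) (by omega)]
        rw [pvCutsFrom_cons l n a hlt (by simp [hp]), pvBSegs]
        simp

-- ===== VERDICT (by name: the statement is the Claim_ definition above) =====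
theorem get_index_for_game_spec : Claim_equal_get_index_for_game := by
  intro l _ hpre
  unfold Spec_get_index_for_game
  obtain ⟨hne, -⟩ := hpre
  have hn : 1 ≤ (l.length : Int) := by
    cases l with
    | nil => exact absurd rfl hne
    | cons a t => simp
  simp only [get_index_for_game, get_index_for_game_alt]
  by_cases h1 : (l.length : Int) = 1
  · obtain ⟨r, rfl⟩ : ∃ r, l = [r] := by
      cases l with
      | nil => simp at h1
      | cons r t =>
        cases t with
        | nil => exact ⟨r, rfl⟩
        | cons s u => exfalso; simp at h1; omega
    simp [pvStepA, pvStepB, pvRowGIG, PySem.List.pyGet?_neg_one, PySem.List.pyRange]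
  · have h2 : 2 ≤ (l.length : Int) := by omega
    rw [show PySem.List.pyRange 0 (l.length : Int) = 0 :: PySem.List.pyRange 1 (l.length : Int) from
          PySem.List.pyRange_one_cons (by omega)]
    simp only [List.foldl_cons]
    rw [show pvStepA l (l.length : Int) (pvLastGIG (pvRowGIG l 0), pvSecGIG (pvRowGIG l 0), []) 0
          = (pvLastGIG (pvRowGIG l (1 - 1)), pvSecGIG (pvRowGIG l 0), []) from by
        norm_num [pvStepA]; omega]
    rw [pvMain l (l.length : Int) ((l.length : Int) - 1).toNat 1 (by omega) (by omega) (by omega)]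
    rw [pvFoldB_eq_bSegs]
    rfl
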